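-- pv_equiv track=rewrite | github.com/orbit3230/Sophomore_First_Semester | Python/week5/process.py | processing
-- ===== SOURCE A (Python) =====
-- def processing(line) :
--     max_index = len(line)   # 문자열의 길이(마지막 인덱스 + 1)
--     line_upper = ""         # 문자열을 대문자로 변환한 것
--     lines = []              # 문자열을 문장 단위로 나눈 것을 담은 리스트
--     next_character = ''     # 다음 문자
--     character_index = 0     # 현재 문자의 인덱스
--     split_point = 0         # 문장을 나누었던 포인트 인덱스
--     # 우선 모든 문자들을 대문자로 변환(alphabetical 한 문자만을 대상으로)
--     for character in line :
--         if 'a' <= character and character <= 'z' :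
--                 line_upper += chr(ord(character) - 32)
--         else :
--             line_upper += character
--
--     # '.'을 기준으로 나누고 각 문장들을 배열(lines)에 저장
--     for character_index in range(max_index):
--         next_character = line_upper[character_index]
--         # 만약 '.'을 만나면
--         if next_character == '.' :
--             # 처음부터 `.`이 처음 나타난 곳 까지를 한 문장으로 배열에 저장
--             lines.append(line_upper[split_point:character_index+1])
--             # 다음 단어부터는 다음 줄(배열 인덱스)에 저장
--             split_point = character_index+1
--
--     return lines
-- ===== SOURCE B (Python) =====
-- def processing(line):
--     # uppercase only ASCII 'a'..'z' (deliberately not str.upper, which differs on non-ASCII)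
--     line_upper = "".join(
--         chr(ord(character) - 32) if 'a' <= character <= 'z' else character
--         for character in line
--     )
--     parts = line_upper.split('.')
--     return [part + '.' for part in parts[:-1]]
-- ===== Notes on version B (the rewrite author's own statement) =====
-- stated objective: simpler
-- what changed: The index-scanning loop that tracks a split point and appends slices is replaced by one split('.') followed by re-appending '.' to every part except the last, and the char-by-char string-building loop becomes a join over a comprehension.
import Mathlib
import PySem

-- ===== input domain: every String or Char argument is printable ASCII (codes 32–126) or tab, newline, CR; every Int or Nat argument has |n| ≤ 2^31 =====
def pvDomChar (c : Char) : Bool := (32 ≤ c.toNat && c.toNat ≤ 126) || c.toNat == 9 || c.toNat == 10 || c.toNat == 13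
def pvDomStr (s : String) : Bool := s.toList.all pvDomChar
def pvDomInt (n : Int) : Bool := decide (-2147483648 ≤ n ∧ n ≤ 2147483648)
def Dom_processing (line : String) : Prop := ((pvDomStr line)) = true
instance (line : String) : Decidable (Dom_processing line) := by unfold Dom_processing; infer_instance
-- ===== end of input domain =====

-- B replaces A's split-point index scan by split('.') plus re-appending '.'; same O(n) cost, simpler.

-- ===== PORT A =====
-- A's first loop: line_upper built char by char (ASCII-only uppercasing)
def pvUpperLoopA (cs : List Char) : List Char :=
  cs.foldl (fun acc character =>
    if 'a' ≤ character ∧ character ≤ 'z' then acc ++ [Char.ofNat (character.toNat - 32)]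
    else acc ++ [character]) []

def processing (line : String) : List String :=
  let maxIndex : Int := (line.toList.length : Int)
  let lineUpper : List Char := pvUpperLoopA line.toList
  -- A's second loop: for character_index in range(max_index), state = (lines, split_point)
  let st := (PySem.List.pyRange 0 maxIndex 1).foldl
    (fun st i =>
      if PySem.List.pyGetD lineUpper i ' ' = '.' then
        (st.1 ++ [String.ofList (PySem.List.slice lineUpper (some st.2) (some (i + 1)))], i + 1)
      else st)
    (([] : List String), (0 : Int))
  st.1

-- ===== PORT B =====
def pvUpperChar (character : Char) : Char :=
  if 'a' ≤ character ∧ character ≤ 'z' then Char.ofNat (character.toNat - 32) else character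

def processing_alt (line : String) : List String :=
  let lineUpper : List Char := line.toList.map pvUpperChar
  let parts : List (List Char) := lineUpper.splitOn '.'   -- str.split('.')
  parts.dropLast.map (fun part => String.ofList (part ++ ['.']))

-- ===== PRECONDITION & SPEC =====
def Spec_processing (line : String) (out : List String) : Prop := out = processing_alt line
instance (line : String) (out : List String) : Decidable (Spec_processing line out) := by unfold Spec_processing; infer_instance

-- ===== CLAIM (what is proved, stated in full; the proofs are below) =====
def Claim_equal_processing : Prop := ∀ (line : String), Dom_processing line → Spec_processing line (processing line)

-- ===== LEMMAS AND PROOFS =====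

lemma pvUpperLoopA_eq_map (cs : List Char) : pvUpperLoopA cs = cs.map pvUpperChar := by
  unfold pvUpperLoopA pvUpperChar
  have h : ∀ (acc : List Char),
      cs.foldl (fun acc character =>
        if 'a' ≤ character ∧ character ≤ 'z' then acc ++ [Char.ofNat (character.toNat - 32)]
        else acc ++ [character]) acc
      = acc ++ cs.map (fun character =>
          if 'a' ≤ character ∧ character ≤ 'z' then Char.ofNat (character.toNat - 32) else character) := by
    induction cs with
    | nil => simp
    | cons c cs ih =>
      intro acc
      simp only [List.foldl_cons, List.map_cons]
      by_cases hc : 'a' ≤ c ∧ c ≤ 'z' <;> simp [hc, ih, List.append_assoc]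
  simpa using h []

-- B-side recursion that mirrors A's scan: pending segment p, remaining chars v
def pvScan (p v : List Char) : List String :=
  match v with
  | [] => []
  | c :: v' =>
    if c = '.' then String.ofList (p ++ ['.']) :: pvScan [] v' else pvScan (p ++ [c]) v'

lemma pvScan_eq_splitOn (v : List Char) : ∀ (p : List Char),
    pvScan p v
      = ((v.splitOn '.').modifyHead (p ++ ·)).dropLast.map (fun q => String.ofList (q ++ ['.'])) := by
  induction v with
  | nil => intro p; simp [pvScan, List.splitOn, List.splitOnP_nil]
  | cons c v ih =>
    intro p
    simp only [pvScan, List.splitOn, List.splitOnP_cons]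
    obtain ⟨q, rest, hqr⟩ := List.exists_cons_of_ne_nil (List.splitOnP_ne_nil (· == '.') v)
    by_cases hc : c = '.'
    · subst hc
      rw [if_pos rfl, ih []]
      simp [List.splitOn, hqr]
    · have hb : (c == '.') = false := by simp [hc]
      rw [if_neg hc, hb, if_neg (by simp), ih (p ++ [c])]
      simp [List.splitOn, hqr]

lemma pvScan_zero_eq_alt (v : List Char) :
    pvScan [] v = (v.splitOn '.').dropLast.map (fun q => String.ofList (q ++ ['.'])) := by
  rw [pvScan_eq_splitOn]
  obtain ⟨q, rest, hqr⟩ := List.exists_cons_of_ne_nil (List.splitOnP_ne_nil (· == '.') v)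
  simp [List.splitOn, hqr]

-- A's slice-based scan equals pvScan: invariant over the index loop
lemma pvLoopA_eq_scan (u : List Char) : ∀ (v : List Char) (k s : Nat) (acc : List String),
    u.drop k = v → s ≤ k →
    ((PySem.List.pyRange (k : Int) (u.length : Int) 1).foldl
      (fun st i =>
        if PySem.List.pyGetD u i ' ' = '.' then
          (st.1 ++ [String.ofList (PySem.List.slice u (some st.2) (some (i + 1)))], i + 1)
        else st)
      (acc, (s : Int))).1
    = acc ++ pvScan ((u.drop s).take (k - s)) v := by
  intro v
  induction v generalizing u with
  | nil =>
    intro k s acc hdrop hsk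
    have hk : u.length ≤ k := by
      have := congrArg List.length hdrop
      simp at this; omega
    rw [PySem.List.pyRange_one_eq_nil (by exact_mod_cast hk)]
    simp [pvScan]
  | cons c v ih =>
    intro k s acc hdrop hsk
    have hk : k < u.length := by
      have := congrArg List.length hdrop
      simp at this; omega
    have hget : u[k]? = some c := by
      have h0 := congrArg (fun l => l[0]?) hdrop
      simpa [List.getElem?_drop] using h0
    have hdrop' : u.drop (k + 1) = v := by
      have := congrArg List.tail hdrop
      simpa [List.tail_drop] using this
    rw [PySem.List.pyRange_one_cons (by exact_mod_cast hk)]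
    have hcast : ((k : Int) + 1) = (((k + 1 : Nat)) : Int) := by push_cast; ring
    simp only [List.foldl_cons, hcast]
    have hgetD : PySem.List.pyGetD u (k : Int) ' ' = c := by
      rw [PySem.List.pyGetD_natCast]
      simp [List.getD, hget]
    have htake : (u.drop s).take (k + 1 - s) = (u.drop s).take (k - s) ++ [c] := by
      rw [show k + 1 - s = (k - s) + 1 by omega, List.take_add_one]
      have hq : (u.drop s)[k - s]? = some c := by
        rw [List.getElem?_drop, show s + (k - s) = k by omega, hget]
      simp [hq]
    by_cases hc : c = '.'
    · rw [hgetD, if_pos hc]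
      have hslice : PySem.List.slice u (some (s : Int)) (some (((k + 1 : Nat)) : Int))
          = (u.drop s).take (k - s) ++ [c] := by
        rw [PySem.List.slice_natCast, htake]
      rw [hslice]
      have hih := ih u (k + 1) (k + 1)
        (acc ++ [String.ofList ((u.drop s).take (k - s) ++ [c])]) hdrop' (le_refl _)
      simp only [Nat.sub_self, List.take_zero] at hih
      rw [hih]
      simp [pvScan, hc, List.append_assoc]
    · rw [hgetD, if_neg hc]
      have hih := ih u (k + 1) s acc hdrop' (by omega)
      rw [hih, htake]
      simp [pvScan, hc]

-- ===== VERDICT (by name: the statement is the Claim_ definition above) =====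
theorem processing_spec : Claim_equal_processing := by
  intro line _
  unfold Spec_processing processing processing_alt
  simp only []
  have h := pvLoopA_eq_scan (pvUpperLoopA line.toList) (pvUpperLoopA line.toList) 0 0 [] (by simp) (le_refl _)
  have hlen : (pvUpperLoopA line.toList).length = line.toList.length := by
    rw [pvUpperLoopA_eq_map]; simp
  rw [← hlen]
  simp only [Nat.cast_zero] at h
  rw [h]
  simp only [Nat.sub_self, List.take_zero, List.drop_zero, List.nil_append]
  rw [pvScan_zero_eq_alt, pvUpperLoopA_eq_map]
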